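-- pv_equiv track=rewrite | github.com/sidnb13/euler | code/114-dp.py | solve116
-- ===== SOURCE A (Python) =====
-- def solve116(units):
--     def helper(m):
--         # DP solution without recursion
--         dp = [0] * (units + 1)
--         # we know base case
--         dp[m] = 1
--         for n in range(m + 1, units + 1):
--             dp[n] = sum([dp[n - m - i] + 1 for i in range(0, n-m + 1)])
--         return dp[units] + 1
--     return sum([helper(m) for m in [2,3,4]])
-- ===== SOURCE B (Python) =====
-- def solve116(units):
--     # Prefix-sum DP: one running total replaces re-summing dp[0..n-m] at every step.
--     total = 0
--     for m in (2, 3, 4):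
--         dp = [0] * (units + 1)
--         dp[m] = 1
--         running = dp[0]  # sum of dp[0..n-m-1], maintained incrementally
--         for n in range(m + 1, units + 1):
--             running += dp[n - m]
--             dp[n] = running + (n - m + 1)
--         total += dp[units] + 1
--     return total
-- ===== Notes on version B (the rewrite author's own statement) =====
-- stated objective: faster
-- what changed: Replaced A's per-step re-summation of dp[0..n-m] (a fresh list comprehension summed at every n) by a single running prefix total updated in O(1) per step, turning each helper pass into one linear scan.
import Mathlib
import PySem

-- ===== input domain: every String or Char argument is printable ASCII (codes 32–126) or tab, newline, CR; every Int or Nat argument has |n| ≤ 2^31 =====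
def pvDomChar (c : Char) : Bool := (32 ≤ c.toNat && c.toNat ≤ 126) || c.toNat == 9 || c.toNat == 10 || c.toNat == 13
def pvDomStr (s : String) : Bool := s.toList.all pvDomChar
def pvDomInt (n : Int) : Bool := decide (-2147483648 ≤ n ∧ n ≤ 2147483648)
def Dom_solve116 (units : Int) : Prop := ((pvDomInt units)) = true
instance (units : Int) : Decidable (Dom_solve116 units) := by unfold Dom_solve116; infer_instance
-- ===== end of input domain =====

-- B replaces A's quadratic per-step re-summation of dp[0..n-m] by a running prefix total (objective: faster).

-- ===== PORT A =====
-- one iteration of A's inner loop body: dp[n] = sum([dp[n-m-i] + 1 for i in range(0, n-m+1)])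
def solve116_stepA (m : Int) (dp : List Int) (n : Int) : List Int :=
  PySem.List.pySetD dp n
    (((PySem.List.pyRange 0 (n - m + 1) 1).map
        (fun i => PySem.List.pyGetD dp (n - m - i) 0 + 1)).sum)

-- helper(m) of A
def solve116_helperA (units m : Int) : Int :=
  let dp0 := List.replicate (units + 1).toNat (0 : Int)
  let dp1 := PySem.List.pySetD dp0 m 1
  let dp2 := (PySem.List.pyRange (m + 1) (units + 1) 1).foldl (solve116_stepA m) dp1
  PySem.List.pyGetD dp2 units 0 + 1

def solve116 (units : Int) : Int :=
  (([2, 3, 4] : List Int).map (fun m => solve116_helperA units m)).sum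

-- ===== PORT B =====
-- one iteration of B's inner loop body: running += dp[n-m]; dp[n] = running + (n-m+1)
def solve116_stepB (m : Int) (s : List Int × Int) (n : Int) : List Int × Int :=
  let running := s.2 + PySem.List.pyGetD s.1 (n - m) 0
  (PySem.List.pySetD s.1 n (running + (n - m + 1)), running)

def solve116_alt (units : Int) : Int :=
  (([2, 3, 4] : List Int).foldl
    (fun total m =>
      let dp0 := List.replicate (units + 1).toNat (0 : Int)
      let dp1 := PySem.List.pySetD dp0 m 1
      let running := PySem.List.pyGetD dp1 0 0
      let s := (PySem.List.pyRange (m + 1) (units + 1) 1).foldl (solve116_stepB m) (dp1, running)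
      total + (PySem.List.pyGetD s.1 units 0 + 1))
    0)

-- ===== PRECONDITION & SPEC =====
-- A raises IndexError (dp[m] with m up to 4 on a list of length units+1) whenever units < 4; Pre_ excludes exactly those inputs.
def Pre_solve116 (units : Int) : Prop := 4 ≤ units
instance (units : Int) : Decidable (Pre_solve116 units) := by unfold Pre_solve116; infer_instance
def pvWitness_solve116 : Int := (7)

def Spec_solve116 (units : Int) (out : Int) : Prop := out = solve116_alt units
instance (units : Int) (out : Int) : Decidable (Spec_solve116 units out) := by unfold Spec_solve116; infer_instance

-- ===== CLAIM (what is proved, stated in full; the proofs are below) =====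
def Claim_equal_solve116 : Prop := ∀ (units : Int), Dom_solve116 units → Pre_solve116 units → Spec_solve116 units (solve116 units)

-- ===== LEMMAS AND PROOFS =====

-- prefix sum of the first j entries of dp
def solve116_Ssum (dp : List Int) (j : Nat) : Int :=
  ((List.range j).map (fun k : Nat => PySem.List.pyGetD dp (k : Int) 0)).sum

theorem solve116_Ssum_succ (dp : List Int) (j : Nat) :
    solve116_Ssum dp (j + 1) = solve116_Ssum dp j + PySem.List.pyGetD dp (j : Int) 0 := by
  simp [solve116_Ssum, List.range_succ]

-- summing dp backwards from index c down to 0 is the forward prefix sum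
theorem solve116_refl_sum (dp : List Int) : ∀ c : Nat,
    ((List.range (c + 1)).map (fun k : Nat => PySem.List.pyGetD dp ((c : Int) - (k : Int)) 0)).sum
      = solve116_Ssum dp (c + 1) := by
  intro c
  induction c with
  | zero => simp [solve116_Ssum, PySem.List.pyGetD_zero, List.getD]
  | succ c ih =>
    rw [List.range_succ_eq_map]
    rw [solve116_Ssum_succ]
    simp only [List.map_cons, List.map_map, List.sum_cons]
    have h1 : ((List.range (c + 1)).map ((fun k : Nat => PySem.List.pyGetD dp (((c : Nat) + 1 : Int) - (k : Int)) 0) ∘ Nat.succ)).sum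
        = ((List.range (c + 1)).map (fun k : Nat => PySem.List.pyGetD dp ((c : Int) - (k : Int)) 0)).sum := by
      apply congrArg
      apply List.map_congr_left
      intro k _
      simp only [Function.comp]
      congr 1
      push_cast
      ring
    push_cast at h1 ⊢
    rw [h1, ih]
    ring_nf

-- writing at an index ≥ j does not change the j-prefix sum
theorem solve116_Ssum_set (dp : List Int) (n : Nat) (v : Int) (j : Nat) (hj : j ≤ n) :
    solve116_Ssum (dp.set n v) j = solve116_Ssum dp j := by
  unfold solve116_Ssum
  apply congrArg
  apply List.map_congr_left
  intro k hk
  rw [List.mem_range] at hk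
  have hne : n ≠ k := by omega
  simp only [PySem.List.pyGetD_natCast, List.getD]
  rw [List.getElem?_set_ne hne]

-- the B fold equals the A fold, carrying the prefix-sum invariant
theorem solve116_fold_eq (m : Int) (hm : 2 ≤ m) : ∀ (ℓ : Nat) (a : Int) (dp : List Int) (run : Int),
    m + 1 ≤ a →
    run = solve116_Ssum dp (a - m).toNat →
    (PySem.List.pyRange a (a + ℓ) 1).foldl (solve116_stepB m) (dp, run)
      = ((PySem.List.pyRange a (a + ℓ) 1).foldl (solve116_stepA m) dp,
         solve116_Ssum ((PySem.List.pyRange a (a + ℓ) 1).foldl (solve116_stepA m) dp) (a + ℓ - m).toNat) := by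
  intro ℓ
  induction ℓ with
  | zero =>
    intro a dp run ha hrun
    simp only [Nat.cast_zero, add_zero]
    rw [PySem.List.pyRange_one_eq_nil (by omega : a ≤ a)]
    simpa using hrun
  | succ ℓ ih =>
    intro a dp run ha hrun
    have hE : a + ((ℓ + 1 : Nat) : Int) = a + 1 + (ℓ : Int) := by push_cast; ring
    rw [hE]
    rw [PySem.List.pyRange_one_cons (by omega : a < a + 1 + (ℓ : Int))]
    simp only [List.foldl_cons]
    set c : Nat := (a - m).toNat with hc
    have hcval : a - m = (c : Int) := by omega
    -- the value A writes equals the value B writes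
    have hval : ((PySem.List.pyRange 0 (a - m + 1) 1).map
          (fun i => PySem.List.pyGetD dp (a - m - i) 0 + 1)).sum
        = (run + PySem.List.pyGetD dp (a - m) 0) + (a - m + 1) := by
      rw [PySem.List.pyRange_one]
      have hlen : (a - m + 1 - 0).toNat = c + 1 := by omega
      rw [hlen, List.map_map]
      have hsplit : ((List.range (c + 1)).map
            ((fun i => PySem.List.pyGetD dp (a - m - i) 0 + 1) ∘ (fun k : Nat => (0 : Int) + (k : Int)))).sum
          = ((List.range (c + 1)).map (fun k : Nat => PySem.List.pyGetD dp ((c : Int) - (k : Int)) 0)).sum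
            + ((List.range (c + 1)).map (fun _ : Nat => (1 : Int))).sum := by
        rw [← List.sum_map_add]
        apply congrArg
        apply List.map_congr_left
        intro k _
        simp [Function.comp, hcval]
      rw [hsplit, solve116_refl_sum]
      have hones : ((List.range (c + 1)).map (fun _ : Nat => (1 : Int))).sum = (c : Int) + 1 := by
        simp
      rw [hones, hrun, solve116_Ssum_succ]
      have hg : PySem.List.pyGetD dp ((c : Int)) 0 = PySem.List.pyGetD dp (a - m) 0 := by
        rw [hcval]
      rw [hg, hcval]
    -- one step of B is one step of A plus the updated running total
    have hstep : solve116_stepB m (dp, run) a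
        = (solve116_stepA m dp a, run + PySem.List.pyGetD dp (a - m) 0) := by
      unfold solve116_stepA solve116_stepB
      simp only
      rw [hval]
    -- invariant after the step
    have hinv : run + PySem.List.pyGetD dp (a - m) 0
        = solve116_Ssum (solve116_stepA m dp a) ((a + 1) - m).toNat := by
      have h1 : ((a + 1) - m).toNat = c + 1 := by omega
      rw [h1]
      unfold solve116_stepA
      rw [PySem.List.pySetD_of_nonneg _ _ (by omega : (0 : Int) ≤ a)]
      rw [solve116_Ssum_set _ _ _ _ (by omega : c + 1 ≤ a.toNat)]
      rw [solve116_Ssum_succ, hrun]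
      have hg : PySem.List.pyGetD dp ((c : Int)) 0 = PySem.List.pyGetD dp (a - m) 0 := by
        rw [hcval]
      rw [hg]
    rw [hstep]
    exact ih (a + 1) (solve116_stepA m dp a) (run + PySem.List.pyGetD dp (a - m) 0) (by omega) hinv

-- per-m: A's helper equals B's per-m contribution
theorem solve116_helper_eq (units m : Int) (hm : 2 ≤ m) (hmu : m ≤ units) :
    solve116_helperA units m
      = (let dp1 := PySem.List.pySetD (List.replicate (units + 1).toNat (0 : Int)) m 1
         let running := PySem.List.pyGetD dp1 0 0
         let s := (PySem.List.pyRange (m + 1) (units + 1) 1).foldl (solve116_stepB m) (dp1, running)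
         PySem.List.pyGetD s.1 units 0 + 1) := by
  simp only [solve116_helperA]
  set dp1 := PySem.List.pySetD (List.replicate (units + 1).toNat (0 : Int)) m 1 with hdp1
  have hrun0 : PySem.List.pyGetD dp1 0 0 = solve116_Ssum dp1 ((m + 1) - m).toNat := by
    have h1 : ((m + 1) - m).toNat = 1 := by omega
    rw [h1, solve116_Ssum_succ]
    simp [solve116_Ssum]
  have hl : (units : Int) + 1 = (m + 1) + ((units - m).toNat : Int) := by omega
  have := solve116_fold_eq m hm (units - m).toNat (m + 1) dp1 (PySem.List.pyGetD dp1 0 0)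
    (by omega) hrun0
  rw [← hl] at this
  rw [this]

-- ===== VERDICT (by name: the statement is the Claim_ definition above) =====
theorem solve116_spec : Claim_equal_solve116 := by
  intro units _ hpre
  unfold Spec_solve116 solve116 solve116_alt
  have h2 := solve116_helper_eq units 2 (by omega) (by unfold Pre_solve116 at hpre; omega)
  have h3 := solve116_helper_eq units 3 (by omega) (by unfold Pre_solve116 at hpre; omega)
  have h4 := solve116_helper_eq units 4 (by omega) (by unfold Pre_solve116 at hpre; omega)
  simp only [List.map_cons, List.map_nil, List.sum_cons, List.sum_nil, List.foldl_cons, List.foldl_nil]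
  simp only at h2 h3 h4
  rw [h2, h3, h4]
  ring
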